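-- pv_equiv track=rewrite | github.com/sophia14324/100days-of-code | day48/main.py | recursive_triangle
-- ===== SOURCE A (Python) =====
-- def recursive_triangle(x, n):
--
--     if type(x) != int or type(n) != int:
--         return 'error'
--     if x > n:
--         x = n
--     if x == 0 or n == 0:
--         return ''
--     star_print = n
--     line_number = x
--     line_print = ''
--
--     difference = star_print - line_number
--     if difference != 0:
--         line_print += ' '*difference
--         line_print += '*'*line_number
--
--     else:
--         line_print += '*'*star_print
--
--     if line_number > 1:
--         return line_print+'\n'+str(recursive_triangle(line_number-1, star_print))
--     elif line_number == 1:
--         return line_print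
-- ===== SOURCE B (Python) =====
-- def recursive_triangle(x, n):
--     if type(x) != int or type(n) != int:
--         return 'error'
--     x = min(x, n)
--     if x == 0 or n == 0:
--         return ''
--     return '\n'.join(' ' * (n - k) + '*' * k for k in range(x, 0, -1))
-- ===== Notes on version B (the rewrite author's own statement) =====
-- stated objective: simpler
-- what changed: Replaces the linear recursion (one call per line, rebuilding clamp and guards at every level) by a single '\n'.join over a comprehension of the line indices range(x, 0, -1).
-- outside the precondition, e.g. on recursive_triangle(-1, 5): A returns None, B returns ''; on recursive_triangle(3, -2): A returns None, B returns ''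
import Mathlib
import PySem

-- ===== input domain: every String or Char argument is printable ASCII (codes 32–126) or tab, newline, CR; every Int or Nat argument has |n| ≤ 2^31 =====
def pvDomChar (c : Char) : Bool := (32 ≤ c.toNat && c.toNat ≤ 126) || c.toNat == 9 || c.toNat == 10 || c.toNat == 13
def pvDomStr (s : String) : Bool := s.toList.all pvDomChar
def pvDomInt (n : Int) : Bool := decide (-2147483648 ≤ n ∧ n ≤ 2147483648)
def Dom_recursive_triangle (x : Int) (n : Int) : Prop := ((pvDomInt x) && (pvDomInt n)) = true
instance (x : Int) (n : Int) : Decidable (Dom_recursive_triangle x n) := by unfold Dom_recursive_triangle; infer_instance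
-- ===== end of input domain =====

-- B replaces A's linear recursion (one call per line) by a single join over the line indices; same guards, same output.


-- ===== PORT A =====
-- Python's `type(x) != int or type(n) != int` check cannot fire here: both arguments are Int by the type convention.
def recursive_triangle (x : Int) (n : Int) : String :=
  let x1 : Int := if x > n then n else x           -- if x > n: x = n
  if x1 = 0 ∨ n = 0 then ""
  else
    let line_print : List Char :=
      if n - x1 ≠ 0 then
        List.replicate (n - x1).toNat ' ' ++ List.replicate x1.toNat '*'   -- ' '*difference + '*'*line_number
      else
        List.replicate n.toNat '*'                                          -- '*'*star_print
    if _h : x1 > 1 then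
      String.ofList line_print ++ "\n" ++ recursive_triangle (x1 - 1) n
    else if x1 = 1 then String.ofList line_print
    else ""  -- Python falls through and returns None here (excluded by Pre_)
termination_by (if x > n then n else x).toNat
decreasing_by
  simp only [x1] at _h
  split_ifs at _h ⊢ <;> omega

-- ===== PORT B =====
def recursive_triangle_alt (x : Int) (n : Int) : String :=
  let x1 : Int := min x n
  if x1 = 0 ∨ n = 0 then ""
  else
    PySem.Str.join "\n" ((PySem.List.pyRange x1 0 (-1)).map
      (fun k => String.ofList (List.replicate (n - k).toNat ' ' ++ List.replicate k.toNat '*')))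

-- ===== PRECONDITION & SPEC =====
-- Pre_ excludes exactly the inputs with n ≠ 0 and min(x, n) < 0, on which Python A falls through
-- its `> 1` / `== 1` branches and returns None, which is not a str value.
def Pre_recursive_triangle (x : Int) (n : Int) : Prop := n = 0 ∨ 0 ≤ min x n
instance (x : Int) (n : Int) : Decidable (Pre_recursive_triangle x n) := by unfold Pre_recursive_triangle; infer_instance
def pvWitness_recursive_triangle : Int × Int := (3, 5)
def Spec_recursive_triangle (x : Int) (n : Int) (out : String) : Prop := out = recursive_triangle_alt x n
instance (x : Int) (n : Int) (out : String) : Decidable (Spec_recursive_triangle x n out) := by unfold Spec_recursive_triangle; infer_instance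

-- ===== CLAIM (what is proved, stated in full; the proofs are below) =====
def Claim_equal_recursive_triangle : Prop := ∀ (x : Int) (n : Int), Dom_recursive_triangle x n → Pre_recursive_triangle x n → Spec_recursive_triangle x n (recursive_triangle x n)

-- ===== LEMMAS AND PROOFS =====

-- one line of the triangle, as a list of characters
def pvLine (n k : Int) : List Char := List.replicate (n - k).toNat ' ' ++ List.replicate k.toNat '*'

-- A's two line-building branches both produce pvLine
lemma lineA_eq (n k : Int) :
    (if n - k ≠ 0 then List.replicate (n - k).toNat ' ' ++ List.replicate k.toNat '*'
     else List.replicate n.toNat '*') = pvLine n k := by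
  unfold pvLine
  split_ifs with hd
  · rfl
  · have hnk : n = k := by omega
    simp [hnk]

-- for x > n the whole body of A only ever sees the clamped x1 = n
lemma A_clamp (x n : Int) (h : x > n) : recursive_triangle x n = recursive_triangle n n := by
  conv_lhs => rw [recursive_triangle]
  conv_rhs => rw [recursive_triangle]
  simp [h]

-- the recursion of A, after the clamp, produces exactly the lines for k = x1, x1-1, …, 1 joined by newlines
lemma A_core (m : Nat) : ∀ (n : Int), ((m : Int) + 1) ≤ n →
    (recursive_triangle ((m : Int) + 1) n).toList =
      PySem.Chars.join ['\n'] ((PySem.List.pyRange ((m : Int) + 1) 0 (-1)).map (pvLine n)) := by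
  induction m with
  | zero =>
    intro n hn
    norm_num at hn ⊢
    rw [recursive_triangle]
    have h1 : (if (1:Int) > n then n else 1) = 1 := by rw [if_neg]; omega
    rw [h1, PySem.List.pyRange_neg_one_cons (by omega : (0:Int) < 1),
        PySem.List.pyRange_neg_one_eq_nil (by omega), List.map_cons, List.map_nil,
        PySem.Chars.join_singleton, if_neg (by omega : ¬ ((1:Int) = 0 ∨ n = 0)),
        dif_neg (by omega : ¬ ((1:Int) > 1)), if_pos rfl, String.toList_ofList, lineA_eq n 1]
  | succ m ih =>
    intro n hn
    push_cast at hn ⊢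
    rw [recursive_triangle]
    have h1 : (if ((m:Int) + 1 + 1) > n then n else ((m:Int) + 1 + 1)) = (m:Int) + 1 + 1 := by
      rw [if_neg]; omega
    have hrest : PySem.List.pyRange ((m : Int) + 1) 0 (-1) =
        ((m : Int) + 1) :: PySem.List.pyRange ((m : Int) + 1 - 1) 0 (-1) :=
      PySem.List.pyRange_neg_one_cons (by omega)
    rw [h1, PySem.List.pyRange_neg_one_cons (by omega : (0:Int) < (m:Int) + 1 + 1),
        if_neg (by omega : ¬ (((m:Int) + 1 + 1) = 0 ∨ n = 0)),
        dif_pos (by omega : ((m:Int) + 1 + 1) > 1),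
        show ((m : Int) + 1 + 1 - 1) = (m : Int) + 1 by ring, List.map_cons]
    conv_rhs => rw [hrest, List.map_cons, PySem.Chars.join_cons_cons, ← List.map_cons, ← hrest,
        ← ih n (by omega)]
    rw [lineA_eq n ((m:Int)+1+1)]
    simp [List.append_assoc]

-- ===== VERDICT (by name: the statement is the Claim_ definition above) =====
theorem recursive_triangle_spec : Claim_equal_recursive_triangle := by
  intro x n _ hpre
  unfold Spec_recursive_triangle
  rw [recursive_triangle_alt]
  by_cases hz : min x n = 0 ∨ n = 0
  · rw [if_pos hz, recursive_triangle]
    have : ((if x > n then n else x) = 0 ∨ n = 0) := by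
      rw [min_def] at hz; split_ifs at hz ⊢ <;> omega
    simp [this]
  · rw [if_neg hz]
    rw [not_or] at hz
    have hmin : 1 ≤ min x n := by
      rcases hpre with h | h
      · exact absurd h hz.2
      · omega
    have hA : recursive_triangle x n = recursive_triangle (min x n) n := by
      by_cases hxn : x > n
      · rw [A_clamp x n hxn, min_eq_right (le_of_lt hxn)]
      · rw [min_eq_left (by omega)]
    obtain ⟨m, hm⟩ : ∃ m : Nat, min x n = (m : Int) + 1 := ⟨(min x n - 1).toNat, by omega⟩
    have hle : (m : Int) + 1 ≤ n := by rw [← hm]; exact min_le_right x n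
    apply String.toList_inj.mp
    rw [hA, hm, A_core m n hle, PySem.Str.toList_join, List.map_map]
    rw [show ("\n" : String).toList = ['\n'] from rfl]
    congr 1
    refine List.map_congr_left (fun k _ => ?_)
    rw [Function.comp_apply, String.toList_ofList, pvLine]
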